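-- pv_equiv track=rewrite | github.com/ephemient/aoc2024 | py/aoc2024/day12.py | _perimeter2
-- ===== SOURCE A (Python) =====
-- from collections import Counter, defaultdict
--
-- def _perimeter2(group: set[tuple[int, int]]) -> int:
--     edges = defaultdict(set)
--     for y, x in group:
--         edges[(2 * y - 1, 2 * x)].add(0)
--         edges[(2 * y, 2 * x - 1)].add(1)
--         edges[(2 * y, 2 * x + 1)].add(3)
--         edges[(2 * y + 1, 2 * x)].add(2)
--     lines = defaultdict(set)
--     for (y, x), value in edges.items():
--         if len(value) == 1:
--             value = next(iter(value))
--             lines[x if value % 2 else y + 1].add((x + y, value))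
--     return sum(
--         1 + sum(abs(q - p) > 2 or b != d for (q, b), (p, d) in zip(line, line[1:]))
--         for line in map(sorted, lines.values())
--     )
-- ===== SOURCE B (Python) =====
-- def _perimeter2(group: set[tuple[int, int]]) -> int:
--     # Count each straight side once, at the cell where it starts (top-/left-most).
--     sides = 0
--     for y, x in group:
--         up = (y - 1, x) in group
--         down = (y + 1, x) in group
--         left = (y, x - 1) in group
--         right = (y, x + 1) in group
--         if not up and (not left or (y - 1, x - 1) in group):
--             sides += 1  # a top side starts here
--         if not down and (not left or (y + 1, x - 1) in group):
--             sides += 1  # a bottom side starts here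
--         if not left and (not up or (y - 1, x - 1) in group):
--             sides += 1  # a left side starts here
--         if not right and (not up or (y - 1, x + 1) in group):
--             sides += 1  # a right side starts here
--     return sides
-- ===== Notes on version B (the rewrite author's own statement) =====
-- stated objective: faster
-- what changed: Replaces the edge-dict / line-grouping / per-line sorting pipeline by a single pass over the cells that counts each straight side once at its canonical (top-/left-most) starting cell using only eight set-membership tests per cell.
import Mathlib
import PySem

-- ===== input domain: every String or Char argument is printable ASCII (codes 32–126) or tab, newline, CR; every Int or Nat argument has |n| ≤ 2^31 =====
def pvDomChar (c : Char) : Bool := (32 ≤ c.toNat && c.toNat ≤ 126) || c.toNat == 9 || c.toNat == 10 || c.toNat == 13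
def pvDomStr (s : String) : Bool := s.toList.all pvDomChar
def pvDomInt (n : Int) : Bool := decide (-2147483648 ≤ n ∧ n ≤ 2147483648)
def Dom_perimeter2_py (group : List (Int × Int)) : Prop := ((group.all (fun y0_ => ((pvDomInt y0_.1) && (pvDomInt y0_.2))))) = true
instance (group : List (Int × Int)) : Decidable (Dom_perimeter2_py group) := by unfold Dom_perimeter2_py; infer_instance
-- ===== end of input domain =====

-- ===== PORT A =====
def perimeter2_py (group : List (Int × Int)) : Int :=
  let edges : PySem.Dict (Int × Int) (PySem.Set Int) :=
    group.foldl (fun d c =>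
      let d := d.modify (2 * c.1 - 1, 2 * c.2) [] (fun s => PySem.Set.add s 0)
      let d := d.modify (2 * c.1, 2 * c.2 - 1) [] (fun s => PySem.Set.add s 1)
      let d := d.modify (2 * c.1, 2 * c.2 + 1) [] (fun s => PySem.Set.add s 3)
      let d := d.modify (2 * c.1 + 1, 2 * c.2) [] (fun s => PySem.Set.add s 2)
      d) PySem.Dict.empty
  let lines : PySem.Dict Int (PySem.Set (Int × Int)) :=
    edges.items.foldl (fun ls kv =>
      if kv.2.length == 1 then
        -- next(iter(value)) on a SINGLETON set: exact, order-independent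
        let v := kv.2.headD 0
        let key := if PySem.Int.mod v 2 ≠ 0 then kv.1.2 else kv.1.1 + 1
        ls.modify key [] (fun s => PySem.Set.add s (kv.1.2 + kv.1.1, v))
      else ls) PySem.Dict.empty
  (lines.values.map (fun line =>
    let l := PySem.List.sorted2 line (fun e => e.1) (fun e => e.2) false
    1 + ((l.zip (PySem.List.slice l (some 1) none)).map (fun pr =>
          if 2 < (pr.1.1 - pr.2.1).natAbs ∨ pr.1.2 ≠ pr.2.2 then (1 : Int) else 0)).sum)).sum

-- ===== PORT B =====
def perimeter2_py_alt (group : List (Int × Int)) : Int :=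
  let g : PySem.Set (Int × Int) := PySem.Set.ofList group
  g.foldl (fun sides c =>
    let up := g.contains (c.1 - 1, c.2)
    let down := g.contains (c.1 + 1, c.2)
    let left := g.contains (c.1, c.2 - 1)
    let right := g.contains (c.1, c.2 + 1)
    let sides := if !up && (!left || g.contains (c.1 - 1, c.2 - 1)) then sides + 1 else sides
    let sides := if !down && (!left || g.contains (c.1 + 1, c.2 - 1)) then sides + 1 else sides
    let sides := if !left && (!up || g.contains (c.1 - 1, c.2 - 1)) then sides + 1 else sides
    let sides := if !right && (!up || g.contains (c.1 - 1, c.2 + 1)) then sides + 1 else sides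
    sides) 0

-- ===== PRECONDITION & SPEC =====
def Spec_perimeter2_py (group : List (Int × Int)) (out : Int) : Prop := out = perimeter2_py_alt group
instance (group : List (Int × Int)) (out : Int) : Decidable (Spec_perimeter2_py group out) := by unfold Spec_perimeter2_py; infer_instance

-- ===== CLAIM (what is proved, stated in full; the proofs are below) =====
def Claim_equal_perimeter2_py : Prop := ∀ (group : List (Int × Int)), Dom_perimeter2_py group → Spec_perimeter2_py group (perimeter2_py group)

-- ===== LEMMAS AND PROOFS =====

-- ===== proof-side helpers =====
def pvP4 (c : Int × Int) : List ((Int × Int) × Int) :=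
  [((2*c.1 - 1, 2*c.2), 0), ((2*c.1, 2*c.2 - 1), 1), ((2*c.1, 2*c.2 + 1), 3), ((2*c.1 + 1, 2*c.2), 2)]

def pvEdges (g : List (Int × Int)) : PySem.Dict (Int × Int) (PySem.Set Int) :=
  (g.flatMap pvP4).foldl (fun d p => d.modify p.1 [] (fun s => PySem.Set.add s p.2)) PySem.Dict.empty

def pvLines (g : List (Int × Int)) : PySem.Dict Int (PySem.Set (Int × Int)) :=
  (pvEdges g).items.foldl (fun ls kv =>
      if kv.2.length == 1 then
        let v := kv.2.headD 0
        let key := if PySem.Int.mod v 2 ≠ 0 then kv.1.2 else kv.1.1 + 1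
        ls.modify key [] (fun s => PySem.Set.add s (kv.1.2 + kv.1.1, v))
      else ls) PySem.Dict.empty

def pvW (line : List (Int × Int)) : Int :=
  let l := PySem.List.sorted2 line (fun e => e.1) (fun e => e.2) false
  1 + ((l.zip (PySem.List.slice l (some 1) none)).map (fun pr =>
        if 2 < (pr.1.1 - pr.2.1).natAbs ∨ pr.1.2 ≠ pr.2.2 then (1 : Int) else 0)).sum

def pvBd (g : List (Int × Int)) (k : Int × Int) : Bool := ((pvEdges g).getD k []).length == 1
def pvTag (g : List (Int × Int)) (k : Int × Int) : Int := ((pvEdges g).getD k []).headD 0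
def pvBKeys (g : List (Int × Int)) : List (Int × Int) := (pvEdges g).keys.filter (pvBd g)
def pvLK (g : List (Int × Int)) (k : Int × Int) : Int :=
  if PySem.Int.mod (pvTag g k) 2 ≠ 0 then k.2 else k.1 + 1
def pvEl (g : List (Int × Int)) (k : Int × Int) : Int × Int := (k.2 + k.1, pvTag g k)

theorem pvA_eq (g : List (Int × Int)) :
    perimeter2_py g = ((pvLines g).values.map pvW).sum := by
  unfold perimeter2_py pvLines pvEdges pvW
  rw [List.foldl_flatMap]
  simp [pvP4]

theorem pv_getD_foldl_modify_add {κ α : Type} [BEq κ] [LawfulBEq κ] [DecidableEq κ]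
    (l : List (κ × α)) (d : PySem.Dict κ (PySem.Set α)) (k : κ) [BEq α] :
    (l.foldl (fun d p => d.modify p.1 [] (fun s => PySem.Set.add s p.2)) d).getD k []
      = PySem.Set.update (d.getD k []) ((l.filter (fun p => p.1 == k)).map Prod.snd) := by
  induction l generalizing d with
  | nil => simp [PySem.Set.update]
  | cons p t ih =>
    simp only [List.foldl_cons, ih, List.filter_cons]
    by_cases h : p.1 = k
    · simp [h, PySem.Dict.getD_modify, PySem.Set.update]
    · simp [h, PySem.Dict.getD_modify, PySem.Set.update, Ne.symm h]

theorem pvE_keys (g : List (Int × Int)) :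
    (pvEdges g).keys = PySem.Set.ofList ((g.flatMap pvP4).map Prod.fst) := by
  unfold pvEdges
  rw [PySem.Dict.keys_foldl_modify_key (g.flatMap pvP4) Prod.fst [] (fun _ p s => PySem.Set.add s p.2)]
  simp [PySem.Set.update, PySem.Set.ofList, PySem.Dict.keys_empty]

theorem pvE_keys_nodup (g : List (Int × Int)) : (pvEdges g).keys.Nodup := by
  rw [pvE_keys]; exact PySem.Set.nodup_ofList _

theorem pvE_getD (g : List (Int × Int)) (k : Int × Int) :
    (pvEdges g).getD k [] = PySem.Set.ofList (((g.flatMap pvP4).filter (fun p => p.1 == k)).map Prod.snd) := by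
  unfold pvEdges
  rw [pv_getD_foldl_modify_add]
  simp [PySem.Set.update, PySem.Set.ofList, PySem.Dict.getD_empty]

theorem pvE_getD_nodup (g : List (Int × Int)) (k : Int × Int) : ((pvEdges g).getD k []).Nodup := by
  rw [pvE_getD]; exact PySem.Set.nodup_ofList _

theorem pv_mem_getD (g : List (Int × Int)) (k : Int × Int) (t : Int) :
    t ∈ (pvEdges g).getD k [] ↔ (k, t) ∈ g.flatMap pvP4 := by
  rw [pvE_getD, PySem.Set.mem_ofList]
  constructor
  · rintro h
    obtain ⟨p, hp, rfl⟩ := List.mem_map.1 h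
    have := List.mem_filter.1 hp
    have hk : p.1 = k := by simpa using this.2
    simpa [← hk] using this.1
  · intro h
    exact List.mem_map.2 ⟨(k, t), List.mem_filter.2 ⟨h, by simp⟩, rfl⟩

theorem pv_mem_flat (g : List (Int × Int)) (p : (Int × Int) × Int) :
    p ∈ g.flatMap pvP4 ↔ ∃ y x, (y, x) ∈ g ∧
      (p = ((2*y-1, 2*x), 0) ∨ p = ((2*y, 2*x-1), 1) ∨ p = ((2*y, 2*x+1), 3) ∨ p = ((2*y+1, 2*x), 2)) := by
  simp only [List.mem_flatMap, pvP4, List.mem_cons, List.not_mem_nil, or_false]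
  constructor
  · rintro ⟨c, hc, h⟩; exact ⟨c.1, c.2, hc, h⟩
  · rintro ⟨y, x, h, hp⟩; exact ⟨(y, x), h, hp⟩

theorem pvkeys_mem (g : List (Int × Int)) (k : Int × Int) :
    k ∈ (pvEdges g).keys ↔ ∃ t, (k, t) ∈ g.flatMap pvP4 := by
  rw [pvE_keys, PySem.Set.mem_ofList]
  constructor
  · intro h; obtain ⟨p, hp, rfl⟩ := List.mem_map.1 h; exact ⟨p.2, hp⟩
  · rintro ⟨t, ht⟩; exact List.mem_map.2 ⟨(k, t), ht, rfl⟩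

theorem pvBd_spec (g : List (Int × Int)) (k : Int × Int) (hk : k ∈ pvBKeys g) :
    (pvEdges g).getD k [] = [pvTag g k] ∧ (k, pvTag g k) ∈ g.flatMap pvP4 := by
  have hbd : pvBd g k = true := (List.mem_filter.1 hk).2
  have hlen : ((pvEdges g).getD k []).length = 1 := by simpa [pvBd] using hbd
  obtain ⟨a, ha⟩ := List.length_eq_one_iff.1 hlen
  have htag : pvTag g k = a := by simp [pvTag, ha]
  refine ⟨by rw [ha, htag], ?_⟩
  rw [← pv_mem_getD, ha, htag]; simp

theorem pvLines_eq (g : List (Int × Int)) :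
    pvLines g = ((pvBKeys g).map (fun k => (pvLK g k, pvEl g k))).foldl
      (fun ls p => ls.modify p.1 [] (fun s => PySem.Set.add s p.2)) PySem.Dict.empty := by
  unfold pvLines
  rw [PySem.Dict.items_eq_map_keys (pvEdges g) (pvE_keys_nodup g) []]
  rw [List.foldl_map, List.foldl_map]
  unfold pvBKeys
  rw [List.foldl_filter]
  apply PySem.List.foldl_congr_mem
  intro acc k _
  by_cases h : pvBd g k = true
  · have : ((pvEdges g).getD k []).length == 1 := by simpa [pvBd] using h
    simp only [this, h, if_true, if_pos]
    simp [pvLK, pvEl, pvTag]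
  · have : ¬(((pvEdges g).getD k []).length == 1) = true := by simpa [pvBd] using h
    simp [this, h]

theorem pvL_keys (g : List (Int × Int)) :
    (pvLines g).keys = PySem.Set.ofList ((pvBKeys g).map (pvLK g)) := by
  rw [pvLines_eq]
  rw [PySem.Dict.keys_foldl_modify_key _ Prod.fst [] (fun _ p s => PySem.Set.add s p.2)]
  simp [PySem.Set.update, PySem.Set.ofList, PySem.Dict.keys_empty, List.map_map, Function.comp_def]

theorem pvL_keys_nodup (g : List (Int × Int)) : (pvLines g).keys.Nodup := by
  rw [pvL_keys]; exact PySem.Set.nodup_ofList _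

theorem pvL_getD (g : List (Int × Int)) (m : Int) :
    (pvLines g).getD m [] = PySem.Set.ofList
      (((pvBKeys g).filter (fun k => pvLK g k == m)).map (pvEl g)) := by
  rw [pvLines_eq, pv_getD_foldl_modify_add]
  rw [List.filter_map, List.map_map]
  simp [PySem.Set.update, PySem.Set.ofList, PySem.Dict.getD_empty, Function.comp_def]

theorem pv_mem_lines (g : List (Int × Int)) (m : Int) (e : Int × Int) :
    e ∈ (pvLines g).getD m [] ↔ ∃ k ∈ pvBKeys g, pvLK g k = m ∧ pvEl g k = e := by
  rw [pvL_getD, PySem.Set.mem_ofList]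
  simp only [List.mem_map, List.mem_filter, beq_iff_eq]
  constructor
  · rintro ⟨k, ⟨hk, hm⟩, rfl⟩; exact ⟨k, hk, hm, rfl⟩
  · rintro ⟨k, hk, hm, rfl⟩; exact ⟨k, ⟨hk, hm⟩, rfl⟩

-- insertion into a strictly-fst-sorted list of pairwise-distinct fsts stays sorted
theorem pvInsertBy_pairwise (x : Int × Int) (ys : List (Int × Int))
    (hys : ys.Pairwise (fun a b => a.1 < b.1)) (hx : ∀ y ∈ ys, y.1 ≠ x.1) :
    (PySem.List.insertBy (fun a b =>
        decide (a.1 < b.1) || !decide (b.1 < a.1) && decide (a.2 < b.2)) x ys).Pairwise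
      (fun a b => a.1 < b.1) := by
  induction ys with
  | nil => simp [PySem.List.insertBy]
  | cons y t ih =>
    by_cases hb : (decide (x.1 < y.1) || !decide (y.1 < x.1) && decide (x.2 < y.2)) = true
    · rw [show PySem.List.insertBy (fun a b =>
        decide (a.1 < b.1) || !decide (b.1 < a.1) && decide (a.2 < b.2)) x (y :: t)
          = x :: y :: t from by simp [PySem.List.insertBy, hb]]
      have hxy : x.1 < y.1 := by
        have hne := hx y (by simp)
        simp only [Bool.or_eq_true, Bool.and_eq_true, Bool.not_eq_true', decide_eq_true_eq,
          decide_eq_false_iff_not] at hb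
        rcases hb with h | ⟨h, _⟩
        · exact h
        · omega
      constructor
      · intro b hb'
        rcases List.mem_cons.1 hb' with rfl | hb'
        · exact hxy
        · have := (List.pairwise_cons.1 hys).1 b hb'
          omega
      · exact hys
    · rw [show PySem.List.insertBy (fun a b =>
        decide (a.1 < b.1) || !decide (b.1 < a.1) && decide (a.2 < b.2)) x (y :: t)
          = y :: PySem.List.insertBy _ x t from by
          simp only [PySem.List.insertBy]
          rw [if_neg hb]]
      have hyx : y.1 < x.1 := by
        have hne := hx y (by simp)
        simp only [Bool.or_eq_true, Bool.and_eq_true, Bool.not_eq_true', decide_eq_true_eq,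
          decide_eq_false_iff_not] at hb
        push_neg at hb
        omega
      have ht := (List.pairwise_cons.1 hys).2
      constructor
      · intro b hb'
        rw [PySem.List.insertBy_mem_iff] at hb'
        rcases hb' with rfl | hb'
        · exact hyx
        · exact (List.pairwise_cons.1 hys).1 b hb'
      · exact ih ht (fun z hz => hx z (by simp [hz]))

theorem pvSorted2_pairwise (xs : List (Int × Int))
    (h : xs.Pairwise (fun a b => a.1 ≠ b.1)) :
    (PySem.List.sorted2 xs (fun e => e.1) (fun e => e.2) false).Pairwise (fun a b => a.1 < b.1) := by
  unfold PySem.List.sorted2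
  simp only [if_neg (by simp : ¬(false = true))]
  -- invariant fold
  suffices H : ∀ (l : List (Int × Int)) (acc : List (Int × Int)),
      acc.Pairwise (fun a b => a.1 < b.1) →
      (∀ a ∈ acc, ∀ b ∈ l, a.1 ≠ b.1) →
      l.Pairwise (fun a b => a.1 ≠ b.1) →
      (l.foldl (fun acc x => PySem.List.insertBy (fun a b =>
          decide (a.1 < b.1) || !decide (b.1 < a.1) && decide (a.2 < b.2)) x acc) acc).Pairwise
        (fun a b => a.1 < b.1) by
    exact H xs [] (by simp) (by simp) h
  intro l
  induction l with
  | nil => intro acc h1 _ _; simpa using h1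
  | cons x t ih =>
    intro acc h1 h2 h3
    simp only [List.foldl_cons]
    apply ih
    · exact pvInsertBy_pairwise x acc h1 (fun y hy => h2 y hy x (by simp))
    · intro a ha b hb
      rw [PySem.List.insertBy_mem_iff] at ha
      rcases ha with rfl | ha
      · exact (List.pairwise_cons.1 h3).1 b hb
      · exact h2 a ha b (by simp [hb])
    · exact (List.pairwise_cons.1 h3).2

theorem pvRuns (l : List (Int × Int)) (hne : l ≠ [])
    (hs : l.Pairwise (fun a b => a.1 < b.1))
    (hodd : ∀ e ∈ l, e.1 % 2 = 1) :
    1 + ((l.zip (PySem.List.slice l (some 1) none)).map (fun pr =>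
          if 2 < (pr.1.1 - pr.2.1).natAbs ∨ pr.1.2 ≠ pr.2.2 then (1 : Int) else 0)).sum
      = (l.countP (fun e => !(l.contains (e.1 - 2, e.2))) : Int) := by
  rw [PySem.List.slice_from_one]
  induction l with
  | nil => simp at hne
  | cons x tl ih =>
    cases tl with
    | nil =>
      have hx : ((x.1 - 2, x.2) ∈ [x]) = False := by
        simp only [List.mem_singleton, eq_iff_iff, iff_false]
        intro h
        have : x.1 - 2 = x.1 := congrArg Prod.fst h
        omega
      simp only [List.tail_cons, List.zip_nil_right, List.map_nil, List.sum_nil]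
      rw [List.countP_cons]
      have : ([x].contains (x.1 - 2, x.2)) = false := by
        simp only [List.contains_eq_mem, decide_eq_false_iff_not, List.mem_singleton]
        intro h
        have h4 := congrArg Prod.fst h
        simp only at h4
        omega
      simp only [this, Bool.not_false, List.countP_nil, if_pos rfl]
      norm_num
    | cons y r =>
      have hs' : (y :: r).Pairwise (fun a b => a.1 < b.1) := (List.pairwise_cons.1 hs).2
      have hodd' : ∀ e ∈ y :: r, e.1 % 2 = 1 := fun e he => hodd e (by simp [he])
      have hxlt : ∀ b ∈ y :: r, x.1 < b.1 := (List.pairwise_cons.1 hs).1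
      have ihh := ih (by simp) hs' hodd'
      have hxodd : x.1 % 2 = 1 := hodd x (by simp)
      have hyodd : y.1 % 2 = 1 := hodd y (by simp)
      have hxy : x.1 < y.1 := hxlt y (by simp)
      -- membership facts
      have hpx : ¬ ((x.1 - 2, x.2) ∈ x :: y :: r) := by
        simp only [List.mem_cons]
        rintro (h | h | h)
        · have : x.1 - 2 = x.1 := congrArg Prod.fst h; omega
        · have : x.1 - 2 = y.1 := congrArg Prod.fst h; omega
        · have h2 := (List.pairwise_cons.1 hs').1 _ h
          simp only at h2
          omega
      have hynot : ¬ ((y.1 - 2, y.2) ∈ y :: r) := by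
        simp only [List.mem_cons]
        rintro (h | h)
        · have : y.1 - 2 = y.1 := congrArg Prod.fst h; omega
        · have h2 := (List.pairwise_cons.1 hs').1 _ h
          simp only at h2
          omega
      have hyfull : ((y.1 - 2, y.2) ∈ x :: y :: r) ↔ ((y.1 - 2, y.2) = x) := by
        simp only [List.mem_cons]
        constructor
        · rintro (h | h)
          · exact h
          · exact absurd (List.mem_cons.2 h) hynot
        · exact fun h => Or.inl h
      have hre : ∀ e ∈ r, (((e.1 - 2, e.2) ∈ x :: y :: r) ↔ ((e.1 - 2, e.2) ∈ y :: r)) := by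
        intro e he
        simp only [List.mem_cons]
        have hye : y.1 < e.1 := (List.pairwise_cons.1 hs').1 _ he
        have heodd : e.1 % 2 = 1 := hodd' e (by simp [he])
        constructor
        · rintro (h | h)
          · exfalso
            have h4 := congrArg Prod.fst h
            simp only at h4
            omega
          · exact h
        · exact fun h => Or.inr h
      -- countP rewrites
      have e1 : List.countP (fun e => !((x :: y :: r).contains (e.1 - 2, e.2))) r
          = List.countP (fun e => !((y :: r).contains (e.1 - 2, e.2))) r := by
        apply List.countP_congr
        intro e he
        simp only [List.contains_eq_mem, Bool.not_eq_true', decide_eq_false_iff_not,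
          Bool.not_eq_eq_eq_not, Bool.not_true, Bool.not_eq_true]
        rw [not_iff_not]
        exact hre e he
      have e2 : List.countP (fun e => !((y :: r).contains (e.1 - 2, e.2))) (y :: r)
          = List.countP (fun e => !((y :: r).contains (e.1 - 2, e.2))) r + 1 := by
        rw [List.countP_cons]
        simp [List.contains_eq_mem, hynot]
      rw [List.countP_cons, List.countP_cons, e1]
      rw [e2] at ihh
      -- zip/map step on the left
      simp only [List.tail_cons] at *
      have hzip : (x :: y :: r).zip (y :: r) = (x, y) :: ((y :: r).zip r) := rfl
      rw [hzip]
      simp only [List.map_cons, List.sum_cons]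
      -- case split on break
      have hcx : (!((x :: y :: r).contains (x.1 - 2, x.2))) = true := by
        simp only [List.contains_eq_mem, Bool.not_eq_true', decide_eq_false_iff_not]
        exact hpx
      by_cases hbrk : (y.1 - 2, y.2) = x
      · have hb1 : (if 2 < (x.1 - y.1).natAbs ∨ x.2 ≠ y.2 then (1:Int) else 0) = 0 := by
          have h1 : y.1 - 2 = x.1 := (Prod.ext_iff.1 hbrk).1
          have h2 : y.2 = x.2 := (Prod.ext_iff.1 hbrk).2
          rw [if_neg]
          rintro (h | h)
          · omega
          · exact h h2.symm
        have hcy : (!((x :: y :: r).contains (y.1 - 2, y.2))) = false := by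
          simp only [List.contains_eq_mem, Bool.not_eq_false', decide_eq_true_eq]
          exact hyfull.2 hbrk
        have t1 : (if (!((x :: y :: r).contains (x.1 - 2, x.2))) = true then (1:Nat) else 0) = 1 := by rw [hcx]; decide
        have t2 : (if (!((x :: y :: r).contains (y.1 - 2, y.2))) = true then (1:Nat) else 0) = 0 := by rw [hcy]; decide
        rw [hb1, t1, t2]
        push_cast
        push_cast at ihh
        omega
      · have hb1 : (if 2 < (x.1 - y.1).natAbs ∨ x.2 ≠ y.2 then (1:Int) else 0) = 1 := by
          rw [if_pos]
          by_cases hd : x.2 = y.2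
          · left
            have h5 : ¬ (y.1 - 2 = x.1) := fun h => hbrk (Prod.ext_iff.2 ⟨h, hd.symm⟩)
            omega
          · right; exact hd
        have hcy : (!((x :: y :: r).contains (y.1 - 2, y.2))) = true := by
          simp only [List.contains_eq_mem, Bool.not_eq_true', decide_eq_false_iff_not]
          rw [hyfull]
          exact hbrk
        rw [hb1, hcy, hcx]
        push_cast
        push_cast at ihh
        have t3 : (if true = true then (1:Int) else 0) = 1 := by decide
        rw [t3]
        omega

def pvQ (g : List (Int × Int)) (k : Int × Int) : Bool :=
  !((pvLines g).getD (pvLK g k) []).contains ((pvEl g k).1 - 2, (pvEl g k).2)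

def pvP (g : List (Int × Int)) (k : Int × Int) : Bool := pvBd g k && pvQ g k

theorem pvBKeys_form (g : List (Int × Int)) (k : Int × Int) (hk : k ∈ pvBKeys g) :
    ∃ y x, (y, x) ∈ g ∧
      ((pvTag g k = 0 ∧ k = (2*y-1, 2*x)) ∨ (pvTag g k = 1 ∧ k = (2*y, 2*x-1)) ∨
       (pvTag g k = 3 ∧ k = (2*y, 2*x+1)) ∨ (pvTag g k = 2 ∧ k = (2*y+1, 2*x))) := by
  obtain ⟨-, hmem⟩ := pvBd_spec g k hk
  obtain ⟨y, x, hc, hca⟩ := (pv_mem_flat g _).1 hmem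
  refine ⟨y, x, hc, ?_⟩
  rcases hca with h | h | h | h
  · exact Or.inl ⟨congrArg Prod.snd h, congrArg Prod.fst h⟩
  · exact Or.inr (Or.inl ⟨congrArg Prod.snd h, congrArg Prod.fst h⟩)
  · exact Or.inr (Or.inr (Or.inl ⟨congrArg Prod.snd h, congrArg Prod.fst h⟩))
  · exact Or.inr (Or.inr (Or.inr ⟨congrArg Prod.snd h, congrArg Prod.fst h⟩))

theorem pvLK_el (g : List (Int × Int)) (k : Int × Int) (hk : k ∈ pvBKeys g) :
    ∃ y x, (y, x) ∈ g ∧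
      ((pvTag g k = 0 ∧ k = (2*y-1, 2*x) ∧ pvLK g k = 2*y ∧ pvEl g k = (2*x+2*y-1, 0)) ∨
       (pvTag g k = 1 ∧ k = (2*y, 2*x-1) ∧ pvLK g k = 2*x-1 ∧ pvEl g k = (2*y+2*x-1, 1)) ∨
       (pvTag g k = 3 ∧ k = (2*y, 2*x+1) ∧ pvLK g k = 2*x+1 ∧ pvEl g k = (2*y+2*x+1, 3)) ∨
       (pvTag g k = 2 ∧ k = (2*y+1, 2*x) ∧ pvLK g k = 2*y+2 ∧ pvEl g k = (2*x+2*y+1, 2))) := by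
  obtain ⟨y, x, hc, hca⟩ := pvBKeys_form g k hk
  have hm0 : PySem.Int.mod (0:Int) 2 = 0 := by decide
  have hm1 : PySem.Int.mod (1:Int) 2 = 1 := by decide
  have hm2 : PySem.Int.mod (2:Int) 2 = 0 := by decide
  have hm3 : PySem.Int.mod (3:Int) 2 = 1 := by decide
  refine ⟨y, x, hc, ?_⟩
  rcases hca with ⟨ht, hke⟩ | ⟨ht, hke⟩ | ⟨ht, hke⟩ | ⟨ht, hke⟩
  · refine Or.inl ⟨ht, hke, ?_, ?_⟩
    · simp only [pvLK, ht, hm0]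
      rw [if_neg (by simp)]
      rw [hke]
      omega
    · have ht2 := ht
      rw [hke] at ht2
      simp only [pvEl, hke, ht2]
      rw [Prod.ext_iff]
      constructor <;> simp <;> omega
  · refine Or.inr (Or.inl ⟨ht, hke, ?_, ?_⟩)
    · simp only [pvLK, ht, hm1]
      rw [if_pos (by simp)]
      rw [hke]
    · have ht2 := ht
      rw [hke] at ht2
      simp only [pvEl, hke, ht2]
      rw [Prod.ext_iff]
      constructor <;> simp <;> omega
  · refine Or.inr (Or.inr (Or.inl ⟨ht, hke, ?_, ?_⟩))
    · simp only [pvLK, ht, hm3]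
      rw [if_pos (by simp)]
      rw [hke]
    · have ht2 := ht
      rw [hke] at ht2
      simp only [pvEl, hke, ht2]
      rw [Prod.ext_iff]
      constructor <;> simp <;> omega
  · refine Or.inr (Or.inr (Or.inr ⟨ht, hke, ?_, ?_⟩))
    · simp only [pvLK, ht, hm2]
      rw [if_neg (by simp)]
      rw [hke]
      omega
    · have ht2 := ht
      rw [hke] at ht2
      simp only [pvEl, hke, ht2]
      rw [Prod.ext_iff]
      constructor <;> simp <;> omega

theorem pvLine_fst_inj (g : List (Int × Int)) (k k' : Int × Int)
    (hk : k ∈ pvBKeys g) (hk' : k' ∈ pvBKeys g)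
    (hlk : pvLK g k = pvLK g k') (hfst : (pvEl g k).1 = (pvEl g k').1) : k = k' := by
  obtain ⟨y, x, -, hca⟩ := pvLK_el g k hk
  obtain ⟨y', x', -, hca'⟩ := pvLK_el g k' hk'
  rcases hca with ⟨ht, hke, hl, he⟩ | ⟨ht, hke, hl, he⟩ | ⟨ht, hke, hl, he⟩ | ⟨ht, hke, hl, he⟩ <;>
    rcases hca' with ⟨ht', hke', hl', he'⟩ | ⟨ht', hke', hl', he'⟩ | ⟨ht', hke', hl', he'⟩ | ⟨ht', hke', hl', he'⟩ <;>
      (rw [hke, hke']; rw [hl, hl'] at hlk; rw [he, he'] at hfst; simp only at hfst ⊢) <;>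
        (rw [Prod.ext_iff]; constructor <;> simp <;> omega)

theorem pvSetCont (s : PySem.Set (Int × Int)) (x : Int × Int) :
    PySem.Set.contains s x = decide (x ∈ s) := by
  by_cases h : x ∈ s
  · simp [h, PySem.Set.contains_iff]
  · rw [decide_eq_false h, ← Bool.not_eq_true, PySem.Set.contains_iff]
    exact h

theorem pvLineCount (g : List (Int × Int)) (m : Int) (hm : m ∈ (pvLines g).keys) :
    pvW ((pvLines g).getD m []) =
      (((pvBKeys g).filter (fun k => pvLK g k == m)).countP (pvQ g) : Int) := by
  set fib := (pvBKeys g).filter (fun k => pvLK g k == m) with hfib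
  have hfibsub : ∀ k ∈ fib, k ∈ pvBKeys g ∧ pvLK g k = m := by
    intro k hk
    have := List.mem_filter.1 hk
    exact ⟨this.1, by simpa using this.2⟩
  have hndB : (pvBKeys g).Nodup := (pvE_keys_nodup g).filter _
  have hndf : fib.Nodup := hndB.filter _
  have hinj : ∀ a ∈ fib, ∀ b ∈ fib, pvEl g a = pvEl g b → a = b := by
    intro a ha b hb he
    exact pvLine_fst_inj g a b (hfibsub a ha).1 (hfibsub b hb).1
      ((hfibsub a ha).2.trans (hfibsub b hb).2.symm) (congrArg Prod.fst he)
  have hndm : (fib.map (pvEl g)).Nodup := List.Nodup.map_on hinj hndf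
  have hLm : (pvLines g).getD m [] = fib.map (pvEl g) := by
    rw [pvL_getD]
    exact PySem.Set.ofList_eq_self_of_nodup _ hndm
  -- the sorted line
  set L := (pvLines g).getD m [] with hL
  have hfst : L.Pairwise (fun a b => a.1 ≠ b.1) := by
    rw [hLm, List.pairwise_map]
    apply List.Pairwise.imp_of_mem _ (List.Nodup.pairwise_of_forall_ne hndf (fun a ha b hb hne => hne))
    intro a b ha hb hne hfe
    exact hne (pvLine_fst_inj g a b (hfibsub a ha).1 (hfibsub b hb).1
      ((hfibsub a ha).2.trans (hfibsub b hb).2.symm) hfe)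
  have hperm := PySem.List.sorted2_perm L (fun e => e.1) (fun e => e.2) false
  set l := PySem.List.sorted2 L (fun e => e.1) (fun e => e.2) false with hl
  have hsp : l.Pairwise (fun a b => a.1 < b.1) := pvSorted2_pairwise L hfst
  have hne : L ≠ [] := by
    rw [pvL_keys, PySem.Set.mem_ofList] at hm
    obtain ⟨k0, hk0, hlk0⟩ := List.mem_map.1 hm
    intro hnil
    have : k0 ∈ fib := List.mem_filter.2 ⟨hk0, by simpa using hlk0⟩
    rw [hLm] at hnil
    simp only [List.map_eq_nil_iff] at hnil
    rw [hnil] at this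
    simp at this
  have hlne : l ≠ [] := by
    intro h
    exact hne (List.Perm.eq_nil (h ▸ hperm.symm))
  have hodd : ∀ e ∈ l, e.1 % 2 = 1 := by
    intro e he
    have heL : e ∈ L := hperm.mem_iff.1 he
    rw [hLm] at heL
    obtain ⟨k, hk, rfl⟩ := List.mem_map.1 heL
    obtain ⟨y, x, -, hca⟩ := pvLK_el g k (hfibsub k hk).1
    rcases hca with ⟨-, -, -, he'⟩ | ⟨-, -, -, he'⟩ | ⟨-, -, -, he'⟩ | ⟨-, -, -, he'⟩ <;>
      rw [he'] <;> simp <;> omega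
  have hruns := pvRuns l hlne hsp hodd
  -- pvW L is exactly the LHS of hruns
  have hW : pvW L = (l.countP (fun e => !(l.contains (e.1 - 2, e.2))) : Int) := by
    rw [pvW]
    exact hruns
  -- move the count to L, then to fib
  have hc1 : l.countP (fun e => !(l.contains (e.1 - 2, e.2)))
      = l.countP (fun e => !(L.contains (e.1 - 2, e.2))) := by
    apply List.countP_congr
    intro e he
    simp [List.contains_eq_mem, pvSetCont, hperm.mem_iff]
  have hc2 : l.countP (fun e => !(L.contains (e.1 - 2, e.2)))
      = L.countP (fun e => !(L.contains (e.1 - 2, e.2))) := hperm.countP_eq _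
  have hc3 : L.countP (fun e => !(L.contains (e.1 - 2, e.2)))
      = fib.countP (fun k => !(L.contains ((pvEl g k).1 - 2, (pvEl g k).2))) := by
    rw [congrArg (List.countP _) hLm, List.countP_map]
    rfl
  have hc4 : fib.countP (fun k => !(L.contains ((pvEl g k).1 - 2, (pvEl g k).2)))
      = fib.countP (pvQ g) := by
    apply List.countP_congr
    intro k hk
    have : pvLK g k = m := (hfibsub k hk).2
    simp only [pvQ, this, ← hL]
  rw [hW, hc1, hc2, hc3, hc4]

theorem pvSumDelta (K : List Int) (hK : K.Nodup) (m0 : Int) (hm : m0 ∈ K) (v : Int) :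
    (K.map (fun m => if m0 = m then v else 0)).sum = v := by
  induction K with
  | nil => simp at hm
  | cons a K ih =>
    rcases List.mem_cons.1 hm with rfl | hm'
    · have hz : (List.map (fun m => if m0 = m then v else 0) K).sum = 0 := by
        rw [List.sum_eq_zero]
        intro x hx
        obtain ⟨m, hmK, rfl⟩ := List.mem_map.1 hx
        rw [if_neg]
        intro h
        exact (List.nodup_cons.1 hK).1 (h ▸ hmK)
      simp [hz]
    · have hne : m0 ≠ a := by
        intro h
        exact (List.nodup_cons.1 hK).1 (h ▸ hm')
      simp only [List.map_cons, List.sum_cons, if_neg hne]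
      rw [ih (List.nodup_cons.1 hK).2 hm']
      ring

theorem pvFiberSum (K : List Int) (hK : K.Nodup) (S : List (Int × Int))
    (lk : (Int × Int) → Int) (q : (Int × Int) → Bool)
    (hcov : ∀ a ∈ S, lk a ∈ K) :
    (K.map (fun m => ((S.filter (fun a => lk a == m)).countP q : Int))).sum
      = (S.countP q : Int) := by
  induction S with
  | nil =>
    simp only [List.filter_nil, List.countP_nil, List.countP_nil]
    rw [List.sum_eq_zero]
    · simp
    · intro x hx
      obtain ⟨m, hmK, rfl⟩ := List.mem_map.1 hx
      simp
  | cons a S ih =>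
    have hcov' : ∀ b ∈ S, lk b ∈ K := fun b hb => hcov b (by simp [hb])
    have step : ∀ m : Int, ((List.filter (fun b => lk b == m) (a :: S)).countP q : Int)
        = ((List.filter (fun b => lk b == m) S).countP q : Int)
          + (if lk a = m then (if q a then (1:Int) else 0) else 0) := by
      intro m
      rw [List.filter_cons]
      by_cases h : lk a = m
      · simp only [h, beq_self_eq_true, if_pos]
        rw [List.countP_cons]
        by_cases hq : q a
        · simp [hq]
        · simp [hq]
      · have : (lk a == m) = false := by simpa using h
        simp [this, h]
    have : (K.map (fun m => ((List.filter (fun b => lk b == m) (a :: S)).countP q : Int))).sum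
        = (K.map (fun m => ((List.filter (fun b => lk b == m) S).countP q : Int))).sum
          + (K.map (fun m => if lk a = m then (if q a then (1:Int) else 0) else 0)).sum := by
      rw [← PySem.List.sum_map_add_int]
      exact congrArg List.sum (List.map_congr_left (fun m _ => step m))
    rw [this, ih hcov', pvSumDelta K hK (lk a) (hcov a (by simp)) _]
    rw [List.countP_cons]
    by_cases hq : q a
    · simp [hq]
    · simp [hq]

theorem pvA_count (g : List (Int × Int)) :
    perimeter2_py g = ((pvBKeys g).countP (pvQ g) : Int) := by
  rw [pvA_eq]
  rw [PySem.Dict.values_eq_map_keys (pvLines g) (pvL_keys_nodup g) []]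
  rw [List.map_map]
  have h1 : ((pvLines g).keys.map (pvW ∘ fun k => (pvLines g).getD k [])).sum
      = ((pvLines g).keys.map (fun m =>
          (((pvBKeys g).filter (fun k => pvLK g k == m)).countP (pvQ g) : Int))).sum := by
    apply congrArg List.sum
    apply List.map_congr_left
    intro m hm
    exact pvLineCount g m hm
  rw [h1]
  apply pvFiberSum _ (pvL_keys_nodup g)
  intro k hk
  rw [pvL_keys, PySem.Set.mem_ofList]
  exact List.mem_map.2 ⟨k, hk, rfl⟩

theorem pvP4_nodup (c : Int × Int) : (pvP4 c).Nodup := by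
  apply List.Nodup.of_map Prod.snd
  simp [pvP4]

theorem pvflat_dedup (g : List (Int × Int)) (p : (Int × Int) × Int) :
    p ∈ (PySem.List.dedup g).flatMap pvP4 ↔ p ∈ g.flatMap pvP4 := by
  simp [List.mem_flatMap, PySem.List.mem_dedup]

theorem pvQd_nodup (g : List (Int × Int)) : ((PySem.List.dedup g).flatMap pvP4).Nodup := by
  rw [List.nodup_flatMap]
  constructor
  · intro c _; exact pvP4_nodup c
  · have hnd := PySem.List.nodup_dedup g
    apply List.Pairwise.imp_of_mem _ hnd
    intro a b _ _ hne
    intro e hea heb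
    apply hne
    simp only [pvP4, List.mem_cons, List.not_mem_nil, or_false] at hea heb
    rcases hea with h | h | h | h <;> rcases heb with h' | h' | h' | h' <;>
      (rw [h'] at h; rw [Prod.ext_iff] at h ⊢;
       simp only [Prod.ext_iff] at h;
       obtain ⟨⟨h1, h2⟩, h3⟩ := h;
       constructor <;> omega)

theorem pvBd_singleton (g : List (Int × Int)) (k : Int × Int) (hbd : pvBd g k = true) :
    ∃ a, (pvEdges g).getD k [] = [a] := by
  have hlen : ((pvEdges g).getD k []).length = 1 := by simpa [pvBd] using hbd
  exact List.length_eq_one_iff.1 hlen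

theorem pvNodupAllEq {α : Type} (l : List α) (hnd : l.Nodup)
    (h : ∀ a ∈ l, ∀ b ∈ l, a = b) : l.length ≤ 1 := by
  cases l with
  | nil => simp
  | cons a t =>
    cases t with
    | nil => simp
    | cons b t =>
      exfalso
      have hab : a = b := h a (by simp) b (by simp)
      rw [List.nodup_cons] at hnd
      exact hnd.1 (hab ▸ (by simp : b ∈ b :: t))

theorem pvCount_le_one (g : List (Int × Int)) (k : Int × Int) (hbd : pvBd g k = true) :
    (((PySem.List.dedup g).flatMap pvP4).map Prod.fst).count k ≤ 1 := by
  rw [List.count_eq_countP, List.countP_map, List.countP_eq_length_filter]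
  apply pvNodupAllEq _ ((pvQd_nodup g).filter _)
  intro a ha b hb
  have hamem := List.mem_filter.1 ha
  have hbmem := List.mem_filter.1 hb
  have hak : a.1 = k := by simpa using hamem.2
  have hbk : b.1 = k := by simpa using hbmem.2
  obtain ⟨w, hw⟩ := pvBd_singleton g k hbd
  have hta : a.2 ∈ (pvEdges g).getD k [] := by
    rw [pv_mem_getD]
    have := (pvflat_dedup g a).1 hamem.1
    rwa [show ((k, a.2) : (Int × Int) × Int) = a from by rw [Prod.ext_iff]; exact ⟨hak.symm, rfl⟩]
  have htb : b.2 ∈ (pvEdges g).getD k [] := by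
    rw [pv_mem_getD]
    have := (pvflat_dedup g b).1 hbmem.1
    rwa [show ((k, b.2) : (Int × Int) × Int) = b from by rw [Prod.ext_iff]; exact ⟨hbk.symm, rfl⟩]
  rw [hw] at hta htb
  simp only [List.mem_singleton] at hta htb
  rw [Prod.ext_iff]
  exact ⟨hak.trans hbk.symm, hta.trans htb.symm⟩

theorem pvCntOfList {α : Type} [BEq α] [LawfulBEq α] (l : List α) (p : α → Bool)
    (h : ∀ x ∈ l, p x = true → l.count x ≤ 1) :
    (PySem.Set.ofList l).countP p = l.countP p := by
  induction l using List.reverseRecOn with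
  | nil => simp [PySem.Set.ofList]
  | append_singleton l x ih =>
    have h' : ∀ x' ∈ l, p x' = true → l.count x' ≤ 1 := by
      intro x' hx' hp
      have := h x' (by simp [hx']) hp
      rw [List.count_append] at this
      omega
    rw [PySem.Set.ofList_append_singleton, List.countP_append, ← ih h']
    unfold PySem.Set.add
    by_cases hx : x ∈ l
    · have hc : (PySem.Set.ofList l).contains x = true := by
        rw [PySem.Set.contains_iff, PySem.Set.mem_ofList]
        exact hx
      rw [if_pos hc]
      have hpx : p x = false := by
        by_contra hp
        rw [Bool.not_eq_false] at hp
        have := h x (by simp) hp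
        rw [List.count_append] at this
        have hpos : 0 < l.count x := List.count_pos_iff.2 hx
        simp at this
        omega
      simp [hpx]
    · have hc : (PySem.Set.ofList l).contains x = false := by
        rw [← Bool.not_eq_true, PySem.Set.contains_iff, PySem.Set.mem_ofList]
        exact hx
      rw [if_neg (by rw [hc]; simp)]
      rw [List.countP_append]

theorem pvA_cells (g : List (Int × Int)) :
    perimeter2_py g = (((PySem.List.dedup g).flatMap pvP4).countP (fun e => pvP g e.1) : Int) := by
  rw [pvA_count]
  congr 1
  -- BKeys countP q = keys countP (bd && q)
  have s1 : (pvBKeys g).countP (pvQ g) = (pvEdges g).keys.countP (pvP g) := by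
    unfold pvBKeys
    rw [List.countP_filter]
    apply List.countP_congr
    intro k _
    simp [pvP, Bool.and_comm]
  -- keys to dedup'd key list
  have s2 : (pvEdges g).keys.countP (pvP g)
      = (PySem.Set.ofList (((PySem.List.dedup g).flatMap pvP4).map Prod.fst)).countP (pvP g) := by
    apply List.Perm.countP_eq
    rw [List.perm_ext_iff_of_nodup (pvE_keys_nodup g) (PySem.Set.nodup_ofList _)]
    intro k
    rw [pvE_keys, PySem.Set.mem_ofList, PySem.Set.mem_ofList]
    constructor
    · intro hk
      obtain ⟨p, hp, rfl⟩ := List.mem_map.1 hk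
      exact List.mem_map.2 ⟨p, (pvflat_dedup g p).2 hp, rfl⟩
    · intro hk
      obtain ⟨p, hp, rfl⟩ := List.mem_map.1 hk
      exact List.mem_map.2 ⟨p, (pvflat_dedup g p).1 hp, rfl⟩
  have s3 : (PySem.Set.ofList (((PySem.List.dedup g).flatMap pvP4).map Prod.fst)).countP (pvP g)
      = (((PySem.List.dedup g).flatMap pvP4).map Prod.fst).countP (pvP g) := by
    apply pvCntOfList
    intro k _ hp
    exact pvCount_le_one g k (Bool.and_elim_left (by simpa [pvP] using hp))
  rw [s1, s2, s3, List.countP_map]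
  rfl

theorem pvVal_top (g : List (Int × Int)) (y x t : Int) :
    t ∈ (pvEdges g).getD (2*y-1, 2*x) [] ↔ ((t = 0 ∧ (y, x) ∈ g) ∨ (t = 2 ∧ (y-1, x) ∈ g)) := by
  rw [pv_mem_getD, pv_mem_flat]
  constructor
  · rintro ⟨y', x', hc, hca⟩
    rcases hca with h | h | h | h <;> simp only [Prod.ext_iff] at h <;> obtain ⟨⟨h1, h2⟩, h3⟩ := h
    · left
      refine ⟨h3, ?_⟩
      have hy : y' = y := by omega
      have hx : x' = x := by omega
      rwa [hy, hx] at hc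
    · exfalso; omega
    · exfalso; omega
    · right
      refine ⟨h3, ?_⟩
      have hy : y' = y - 1 := by omega
      have hx : x' = x := by omega
      rwa [hy, hx] at hc
  · rintro (⟨rfl, hc⟩ | ⟨rfl, hc⟩)
    · exact ⟨y, x, hc, Or.inl rfl⟩
    · refine ⟨y-1, x, hc, Or.inr (Or.inr (Or.inr ?_))⟩
      refine Prod.ext_iff.2 ⟨Prod.ext_iff.2 ⟨?_, ?_⟩, ?_⟩ <;> simp <;> omega

theorem pvVal_left (g : List (Int × Int)) (y x t : Int) :
    t ∈ (pvEdges g).getD (2*y, 2*x-1) [] ↔ ((t = 1 ∧ (y, x) ∈ g) ∨ (t = 3 ∧ (y, x-1) ∈ g)) := by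
  rw [pv_mem_getD, pv_mem_flat]
  constructor
  · rintro ⟨y', x', hc, hca⟩
    rcases hca with h | h | h | h <;> simp only [Prod.ext_iff] at h <;> obtain ⟨⟨h1, h2⟩, h3⟩ := h
    · exfalso; omega
    · left
      refine ⟨h3, ?_⟩
      have hy : y' = y := by omega
      have hx : x' = x := by omega
      rwa [hy, hx] at hc
    · right
      refine ⟨h3, ?_⟩
      have hy : y' = y := by omega
      have hx : x' = x - 1 := by omega
      rwa [hy, hx] at hc
    · exfalso; omega
  · rintro (⟨rfl, hc⟩ | ⟨rfl, hc⟩)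
    · exact ⟨y, x, hc, Or.inr (Or.inl rfl)⟩
    · refine ⟨y, x-1, hc, Or.inr (Or.inr (Or.inl ?_))⟩
      refine Prod.ext_iff.2 ⟨Prod.ext_iff.2 ⟨?_, ?_⟩, ?_⟩ <;> simp <;> omega

theorem pvVal_right (g : List (Int × Int)) (y x t : Int) :
    t ∈ (pvEdges g).getD (2*y, 2*x+1) [] ↔ ((t = 3 ∧ (y, x) ∈ g) ∨ (t = 1 ∧ (y, x+1) ∈ g)) := by
  rw [pv_mem_getD, pv_mem_flat]
  constructor
  · rintro ⟨y', x', hc, hca⟩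
    rcases hca with h | h | h | h <;> simp only [Prod.ext_iff] at h <;> obtain ⟨⟨h1, h2⟩, h3⟩ := h
    · exfalso; omega
    · right
      refine ⟨h3, ?_⟩
      have hy : y' = y := by omega
      have hx : x' = x + 1 := by omega
      rwa [hy, hx] at hc
    · left
      refine ⟨h3, ?_⟩
      have hy : y' = y := by omega
      have hx : x' = x := by omega
      rwa [hy, hx] at hc
    · exfalso; omega
  · rintro (⟨rfl, hc⟩ | ⟨rfl, hc⟩)
    · exact ⟨y, x, hc, Or.inr (Or.inr (Or.inl rfl))⟩
    · refine ⟨y, x+1, hc, Or.inr (Or.inl ?_)⟩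
      refine Prod.ext_iff.2 ⟨Prod.ext_iff.2 ⟨?_, ?_⟩, ?_⟩ <;> simp <;> omega

theorem pvVal_bot (g : List (Int × Int)) (y x t : Int) :
    t ∈ (pvEdges g).getD (2*y+1, 2*x) [] ↔ ((t = 2 ∧ (y, x) ∈ g) ∨ (t = 0 ∧ (y+1, x) ∈ g)) := by
  rw [pv_mem_getD, pv_mem_flat]
  constructor
  · rintro ⟨y', x', hc, hca⟩
    rcases hca with h | h | h | h <;> simp only [Prod.ext_iff] at h <;> obtain ⟨⟨h1, h2⟩, h3⟩ := h
    · right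
      refine ⟨h3, ?_⟩
      have hy : y' = y + 1 := by omega
      have hx : x' = x := by omega
      rwa [hy, hx] at hc
    · exfalso; omega
    · exfalso; omega
    · left
      refine ⟨h3, ?_⟩
      have hy : y' = y := by omega
      have hx : x' = x := by omega
      rwa [hy, hx] at hc
  · rintro (⟨rfl, hc⟩ | ⟨rfl, hc⟩)
    · exact ⟨y, x, hc, Or.inr (Or.inr (Or.inr rfl))⟩
    · refine ⟨y+1, x, hc, Or.inl ?_⟩
      refine Prod.ext_iff.2 ⟨Prod.ext_iff.2 ⟨?_, ?_⟩, ?_⟩ <;> simp <;> omega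

theorem pvValLen (l : List Int) (hnd : l.Nodup) (t0 t1 : Int) (hne : t0 ≠ t1) (P : Prop)
    (hchar : ∀ t, t ∈ l ↔ (t = t0 ∨ (t = t1 ∧ P))) :
    ((l.length = 1) ↔ ¬P) ∧ (¬P → l = [t0]) := by
  have h0 : t0 ∈ l := (hchar t0).2 (Or.inl rfl)
  have part2 : ¬P → l = [t0] := by
    intro hP
    have hall : ∀ t ∈ l, t = t0 := by
      intro t ht
      rcases (hchar t).1 ht with h | ⟨-, h⟩
      · exact h
      · exact absurd h hP
    cases l with
    | nil => simp at h0
    | cons a t =>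
      cases t with
      | nil => rw [hall a (by simp)]
      | cons b t =>
        exfalso
        have ha : a = t0 := hall a (by simp)
        have hb : b = t0 := hall b (by simp)
        rw [List.nodup_cons] at hnd
        exact hnd.1 ((ha.trans hb.symm) ▸ (by simp : b ∈ b :: t))
  refine ⟨⟨?_, fun hP => by rw [part2 hP]; rfl⟩, part2⟩
  intro hlen hP
  obtain ⟨a, ha⟩ := List.length_eq_one_iff.1 hlen
  have h1 : t1 ∈ l := (hchar t1).2 (Or.inr ⟨rfl, hP⟩)
  rw [ha] at h0 h1
  simp only [List.mem_singleton] at h0 h1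
  exact hne (h0.trans h1.symm)

theorem pvBd_len (g : List (Int × Int)) (k : Int × Int) :
    pvBd g k = true ↔ ((pvEdges g).getD k []).length = 1 := by
  simp [pvBd]

theorem pvTop_spec (g : List (Int × Int)) (y x : Int) (hc : (y, x) ∈ g) :
    (pvBd g (2*y-1, 2*x) = true ↔ (y-1, x) ∉ g) ∧
    ((y-1, x) ∉ g → pvTag g (2*y-1, 2*x) = 0) := by
  have hchar : ∀ t, t ∈ (pvEdges g).getD (2*y-1, 2*x) [] ↔ (t = 0 ∨ (t = 2 ∧ (y-1, x) ∈ g)) := by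
    intro t
    rw [pvVal_top]
    constructor
    · rintro (⟨rfl, -⟩ | ⟨rfl, h⟩)
      · exact Or.inl rfl
      · exact Or.inr ⟨rfl, h⟩
    · rintro (rfl | ⟨rfl, h⟩)
      · exact Or.inl ⟨rfl, hc⟩
      · exact Or.inr ⟨rfl, h⟩
  have hv := pvValLen _ (pvE_getD_nodup g _) 0 2 (by norm_num) _ hchar
  exact ⟨(pvBd_len g _).trans hv.1, fun h => by rw [pvTag, hv.2 h]; rfl⟩

theorem pvLeft_spec (g : List (Int × Int)) (y x : Int) (hc : (y, x) ∈ g) :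
    (pvBd g (2*y, 2*x-1) = true ↔ (y, x-1) ∉ g) ∧
    ((y, x-1) ∉ g → pvTag g (2*y, 2*x-1) = 1) := by
  have hchar : ∀ t, t ∈ (pvEdges g).getD (2*y, 2*x-1) [] ↔ (t = 1 ∨ (t = 3 ∧ (y, x-1) ∈ g)) := by
    intro t
    rw [pvVal_left]
    constructor
    · rintro (⟨rfl, -⟩ | ⟨rfl, h⟩)
      · exact Or.inl rfl
      · exact Or.inr ⟨rfl, h⟩
    · rintro (rfl | ⟨rfl, h⟩)
      · exact Or.inl ⟨rfl, hc⟩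
      · exact Or.inr ⟨rfl, h⟩
  have hv := pvValLen _ (pvE_getD_nodup g _) 1 3 (by norm_num) _ hchar
  exact ⟨(pvBd_len g _).trans hv.1, fun h => by rw [pvTag, hv.2 h]; rfl⟩

theorem pvRight_spec (g : List (Int × Int)) (y x : Int) (hc : (y, x) ∈ g) :
    (pvBd g (2*y, 2*x+1) = true ↔ (y, x+1) ∉ g) ∧
    ((y, x+1) ∉ g → pvTag g (2*y, 2*x+1) = 3) := by
  have hchar : ∀ t, t ∈ (pvEdges g).getD (2*y, 2*x+1) [] ↔ (t = 3 ∨ (t = 1 ∧ (y, x+1) ∈ g)) := by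
    intro t
    rw [pvVal_right]
    constructor
    · rintro (⟨rfl, -⟩ | ⟨rfl, h⟩)
      · exact Or.inl rfl
      · exact Or.inr ⟨rfl, h⟩
    · rintro (rfl | ⟨rfl, h⟩)
      · exact Or.inl ⟨rfl, hc⟩
      · exact Or.inr ⟨rfl, h⟩
  have hv := pvValLen _ (pvE_getD_nodup g _) 3 1 (by norm_num) _ hchar
  exact ⟨(pvBd_len g _).trans hv.1, fun h => by rw [pvTag, hv.2 h]; rfl⟩

theorem pvBot_spec (g : List (Int × Int)) (y x : Int) (hc : (y, x) ∈ g) :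
    (pvBd g (2*y+1, 2*x) = true ↔ (y+1, x) ∉ g) ∧
    ((y+1, x) ∉ g → pvTag g (2*y+1, 2*x) = 2) := by
  have hchar : ∀ t, t ∈ (pvEdges g).getD (2*y+1, 2*x) [] ↔ (t = 2 ∨ (t = 0 ∧ (y+1, x) ∈ g)) := by
    intro t
    rw [pvVal_bot]
    constructor
    · rintro (⟨rfl, -⟩ | ⟨rfl, h⟩)
      · exact Or.inl rfl
      · exact Or.inr ⟨rfl, h⟩
    · rintro (rfl | ⟨rfl, h⟩)
      · exact Or.inl ⟨rfl, hc⟩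
      · exact Or.inr ⟨rfl, h⟩
  have hv := pvValLen _ (pvE_getD_nodup g _) 2 0 (by norm_num) _ hchar
  exact ⟨(pvBd_len g _).trans hv.1, fun h => by rw [pvTag, hv.2 h]; rfl⟩

theorem pvQ_top (g : List (Int × Int)) (y x : Int) (hc : (y, x) ∈ g) (hb : (y-1, x) ∉ g) :
    pvQ g (2*y-1, 2*x) = (decide ((y, x-1) ∉ g) || decide ((y-1, x-1) ∈ g)) := by
  have htag : pvTag g (2*y-1, 2*x) = 0 := (pvTop_spec g y x hc).2 hb
  have hm0 : PySem.Int.mod (0:Int) 2 = 0 := by decide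
  have hlk : pvLK g (2*y-1, 2*x) = 2*y := by
    simp only [pvLK, htag, hm0]
    rw [if_neg (by simp)]
    show (2*y-1) + 1 = 2*y
    omega
  have hel1 : (pvEl g (2*y-1, 2*x)).1 = 2*x + 2*y - 1 := by
    show 2*x + (2*y-1) = 2*x + 2*y - 1
    omega
  have hel2 : (pvEl g (2*y-1, 2*x)).2 = 0 := htag
  have hmem : ((2*x+2*y-3, (0:Int)) ∈ (pvLines g).getD (2*y) []) ↔ ((y, x-1) ∈ g ∧ (y-1, x-1) ∉ g) := by
    rw [pv_mem_lines]
    constructor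
    · rintro ⟨k', hk', hlk', hel'⟩
      have htg' : pvTag g k' = 0 := by simpa [pvEl] using congrArg Prod.snd hel'
      obtain ⟨y', x', hc', hca'⟩ := pvLK_el g k' hk'
      rcases hca' with ⟨ht', hke', hl', he'⟩ | ⟨ht', hke', hl', he'⟩ | ⟨ht', hke', hl', he'⟩ | ⟨ht', hke', hl', he'⟩
      · have hfst := congrArg Prod.fst (he'.symm.trans hel')
        simp only at hfst
        have hyy := hl'.symm.trans hlk'
        have hy' : y' = y := by omega
        have hx' : x' = x - 1 := by omega
        rw [hy', hx'] at hc' hke'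
        refine ⟨hc', ?_⟩
        have hbd := (List.mem_filter.1 hk').2
        rw [hke'] at hbd
        exact ((pvTop_spec g y (x-1) hc').1).1 hbd
      · exact absurd (htg'.symm.trans ht') (by norm_num)
      · exact absurd (htg'.symm.trans ht') (by norm_num)
      · exact absurd (htg'.symm.trans ht') (by norm_num)
    · rintro ⟨hcl, hbl⟩
      have ht2 : pvTag g (2*y-1, 2*(x-1)) = 0 := by
        have := (pvTop_spec g y (x-1) hcl).2 hbl
        simpa using this
      refine ⟨(2*y-1, 2*(x-1)), List.mem_filter.2 ⟨?_, ?_⟩, ?_, ?_⟩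
      · rw [pvkeys_mem]
        exact ⟨0, (pv_mem_flat g _).2 ⟨y, x-1, hcl, Or.inl rfl⟩⟩
      · have := ((pvTop_spec g y (x-1) hcl).1).2 hbl
        simpa using this
      · simp only [pvLK, ht2, hm0]
        rw [if_neg (by simp)]
        show (2*y-1) + 1 = 2*y
        omega
      · refine Prod.ext_iff.2 ⟨?_, ht2⟩
        show 2*(x-1) + (2*y-1) = 2*x+2*y-3
        omega
  have harg : ((pvEl g (2*y-1, 2*x)).1 - 2, (pvEl g (2*y-1, 2*x)).2) = ((2*x+2*y-3 : Int), (0:Int)) := by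
    rw [hel1, hel2]
    refine Prod.ext_iff.2 ⟨by omega, rfl⟩
  rw [pvQ, hlk, harg, pvSetCont]
  by_cases h1 : (y, x-1) ∈ g <;> by_cases h2 : (y-1, x-1) ∈ g <;> simp [hmem, h1, h2]

theorem pvQ_left (g : List (Int × Int)) (y x : Int) (hc : (y, x) ∈ g) (hb : (y, x-1) ∉ g) :
    pvQ g (2*y, 2*x-1) = (decide ((y-1, x) ∉ g) || decide ((y-1, x-1) ∈ g)) := by
  have htag : pvTag g (2*y, 2*x-1) = 1 := (pvLeft_spec g y x hc).2 hb
  have hm1 : PySem.Int.mod (1:Int) 2 = 1 := by decide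
  have hlk : pvLK g (2*y, 2*x-1) = 2*x-1 := by
    simp only [pvLK, htag, hm1]
    rw [if_pos (by simp)]
  have hel1 : (pvEl g (2*y, 2*x-1)).1 = 2*y + 2*x - 1 := by
    show (2*x-1) + 2*y = 2*y + 2*x - 1
    omega
  have hel2 : (pvEl g (2*y, 2*x-1)).2 = 1 := htag
  have hmem : ((2*y+2*x-3, (1:Int)) ∈ (pvLines g).getD (2*x-1) []) ↔ ((y-1, x) ∈ g ∧ (y-1, x-1) ∉ g) := by
    rw [pv_mem_lines]
    constructor
    · rintro ⟨k', hk', hlk', hel'⟩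
      have htg' : pvTag g k' = 1 := by simpa [pvEl] using congrArg Prod.snd hel'
      obtain ⟨y', x', hc', hca'⟩ := pvLK_el g k' hk'
      rcases hca' with ⟨ht', hke', hl', he'⟩ | ⟨ht', hke', hl', he'⟩ | ⟨ht', hke', hl', he'⟩ | ⟨ht', hke', hl', he'⟩
      · exact absurd (htg'.symm.trans ht') (by norm_num)
      · have hfst := congrArg Prod.fst (he'.symm.trans hel')
        simp only at hfst
        have hyy := hl'.symm.trans hlk'
        have hx' : x' = x := by omega
        have hy' : y' = y - 1 := by omega
        rw [hy', hx'] at hc' hke'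
        refine ⟨hc', ?_⟩
        have hbd := (List.mem_filter.1 hk').2
        rw [hke'] at hbd
        exact ((pvLeft_spec g (y-1) x hc').1).1 hbd
      · exact absurd (htg'.symm.trans ht') (by norm_num)
      · exact absurd (htg'.symm.trans ht') (by norm_num)
    · rintro ⟨hcl, hbl⟩
      have ht2 : pvTag g (2*(y-1), 2*x-1) = 1 := by
        have := (pvLeft_spec g (y-1) x hcl).2 hbl
        simpa using this
      refine ⟨(2*(y-1), 2*x-1), List.mem_filter.2 ⟨?_, ?_⟩, ?_, ?_⟩
      · rw [pvkeys_mem]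
        exact ⟨1, (pv_mem_flat g _).2 ⟨y-1, x, hcl, Or.inr (Or.inl rfl)⟩⟩
      · have := ((pvLeft_spec g (y-1) x hcl).1).2 hbl
        simpa using this
      · simp only [pvLK, ht2, hm1]
        rw [if_pos (by simp)]
      · refine Prod.ext_iff.2 ⟨?_, ht2⟩
        show (2*x-1) + 2*(y-1) = 2*y+2*x-3
        omega
  have harg : ((pvEl g (2*y, 2*x-1)).1 - 2, (pvEl g (2*y, 2*x-1)).2) = ((2*y+2*x-3 : Int), (1:Int)) := by
    rw [hel1, hel2]
    refine Prod.ext_iff.2 ⟨by omega, rfl⟩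
  rw [pvQ, hlk, harg, pvSetCont]
  by_cases h1 : (y-1, x) ∈ g <;> by_cases h2 : (y-1, x-1) ∈ g <;> simp [hmem, h1, h2]

theorem pvQ_right (g : List (Int × Int)) (y x : Int) (hc : (y, x) ∈ g) (hb : (y, x+1) ∉ g) :
    pvQ g (2*y, 2*x+1) = (decide ((y-1, x) ∉ g) || decide ((y-1, x+1) ∈ g)) := by
  have htag : pvTag g (2*y, 2*x+1) = 3 := (pvRight_spec g y x hc).2 hb
  have hm3 : PySem.Int.mod (3:Int) 2 = 1 := by decide
  have hlk : pvLK g (2*y, 2*x+1) = 2*x+1 := by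
    simp only [pvLK, htag, hm3]
    rw [if_pos (by simp)]
  have hel1 : (pvEl g (2*y, 2*x+1)).1 = 2*y + 2*x + 1 := by
    show (2*x+1) + 2*y = 2*y + 2*x + 1
    omega
  have hel2 : (pvEl g (2*y, 2*x+1)).2 = 3 := htag
  have hmem : ((2*y+2*x-1, (3:Int)) ∈ (pvLines g).getD (2*x+1) []) ↔ ((y-1, x) ∈ g ∧ (y-1, x+1) ∉ g) := by
    rw [pv_mem_lines]
    constructor
    · rintro ⟨k', hk', hlk', hel'⟩
      have htg' : pvTag g k' = 3 := by simpa [pvEl] using congrArg Prod.snd hel'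
      obtain ⟨y', x', hc', hca'⟩ := pvLK_el g k' hk'
      rcases hca' with ⟨ht', hke', hl', he'⟩ | ⟨ht', hke', hl', he'⟩ | ⟨ht', hke', hl', he'⟩ | ⟨ht', hke', hl', he'⟩
      · exact absurd (htg'.symm.trans ht') (by norm_num)
      · exact absurd (htg'.symm.trans ht') (by norm_num)
      · have hfst := congrArg Prod.fst (he'.symm.trans hel')
        simp only at hfst
        have hyy := hl'.symm.trans hlk'
        have hx' : x' = x := by omega
        have hy' : y' = y - 1 := by omega
        rw [hy', hx'] at hc' hke'
        refine ⟨hc', ?_⟩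
        have hbd := (List.mem_filter.1 hk').2
        rw [hke'] at hbd
        exact ((pvRight_spec g (y-1) x hc').1).1 hbd
      · exact absurd (htg'.symm.trans ht') (by norm_num)
    · rintro ⟨hcl, hbl⟩
      have ht2 : pvTag g (2*(y-1), 2*x+1) = 3 := by
        have := (pvRight_spec g (y-1) x hcl).2 hbl
        simpa using this
      refine ⟨(2*(y-1), 2*x+1), List.mem_filter.2 ⟨?_, ?_⟩, ?_, ?_⟩
      · rw [pvkeys_mem]
        exact ⟨3, (pv_mem_flat g _).2 ⟨y-1, x, hcl, Or.inr (Or.inr (Or.inl rfl))⟩⟩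
      · have := ((pvRight_spec g (y-1) x hcl).1).2 hbl
        simpa using this
      · simp only [pvLK, ht2, hm3]
        rw [if_pos (by simp)]
      · refine Prod.ext_iff.2 ⟨?_, ht2⟩
        show (2*x+1) + 2*(y-1) = 2*y+2*x-1
        omega
  have harg : ((pvEl g (2*y, 2*x+1)).1 - 2, (pvEl g (2*y, 2*x+1)).2) = ((2*y+2*x-1 : Int), (3:Int)) := by
    rw [hel1, hel2]
    refine Prod.ext_iff.2 ⟨by omega, rfl⟩
  rw [pvQ, hlk, harg, pvSetCont]
  by_cases h1 : (y-1, x) ∈ g <;> by_cases h2 : (y-1, x+1) ∈ g <;> simp [hmem, h1, h2]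

theorem pvQ_bot (g : List (Int × Int)) (y x : Int) (hc : (y, x) ∈ g) (hb : (y+1, x) ∉ g) :
    pvQ g (2*y+1, 2*x) = (decide ((y, x-1) ∉ g) || decide ((y+1, x-1) ∈ g)) := by
  have htag : pvTag g (2*y+1, 2*x) = 2 := (pvBot_spec g y x hc).2 hb
  have hm2 : PySem.Int.mod (2:Int) 2 = 0 := by decide
  have hlk : pvLK g (2*y+1, 2*x) = 2*y+2 := by
    simp only [pvLK, htag, hm2]
    rw [if_neg (by simp)]
    show (2*y+1) + 1 = 2*y+2
    omega
  have hel1 : (pvEl g (2*y+1, 2*x)).1 = 2*x + 2*y + 1 := by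
    show 2*x + (2*y+1) = 2*x + 2*y + 1
    omega
  have hel2 : (pvEl g (2*y+1, 2*x)).2 = 2 := htag
  have hmem : ((2*x+2*y-1, (2:Int)) ∈ (pvLines g).getD (2*y+2) []) ↔ ((y, x-1) ∈ g ∧ (y+1, x-1) ∉ g) := by
    rw [pv_mem_lines]
    constructor
    · rintro ⟨k', hk', hlk', hel'⟩
      have htg' : pvTag g k' = 2 := by simpa [pvEl] using congrArg Prod.snd hel'
      obtain ⟨y', x', hc', hca'⟩ := pvLK_el g k' hk'
      rcases hca' with ⟨ht', hke', hl', he'⟩ | ⟨ht', hke', hl', he'⟩ | ⟨ht', hke', hl', he'⟩ | ⟨ht', hke', hl', he'⟩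
      · exact absurd (htg'.symm.trans ht') (by norm_num)
      · exact absurd (htg'.symm.trans ht') (by norm_num)
      · exact absurd (htg'.symm.trans ht') (by norm_num)
      · have hfst := congrArg Prod.fst (he'.symm.trans hel')
        simp only at hfst
        have hyy := hl'.symm.trans hlk'
        have hy' : y' = y := by omega
        have hx' : x' = x - 1 := by omega
        rw [hy', hx'] at hc' hke'
        refine ⟨hc', ?_⟩
        have hbd := (List.mem_filter.1 hk').2
        rw [hke'] at hbd
        exact ((pvBot_spec g y (x-1) hc').1).1 hbd
    · rintro ⟨hcl, hbl⟩
      have ht2 : pvTag g (2*y+1, 2*(x-1)) = 2 := by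
        have := (pvBot_spec g y (x-1) hcl).2 hbl
        simpa using this
      refine ⟨(2*y+1, 2*(x-1)), List.mem_filter.2 ⟨?_, ?_⟩, ?_, ?_⟩
      · rw [pvkeys_mem]
        exact ⟨2, (pv_mem_flat g _).2 ⟨y, x-1, hcl, Or.inr (Or.inr (Or.inr rfl))⟩⟩
      · have := ((pvBot_spec g y (x-1) hcl).1).2 hbl
        simpa using this
      · simp only [pvLK, ht2, hm2]
        rw [if_neg (by simp)]
        show (2*y+1) + 1 = 2*y+2
        omega
      · refine Prod.ext_iff.2 ⟨?_, ht2⟩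
        show 2*(x-1) + (2*y+1) = 2*x+2*y-1
        omega
  have harg : ((pvEl g (2*y+1, 2*x)).1 - 2, (pvEl g (2*y+1, 2*x)).2) = ((2*x+2*y-1 : Int), (2:Int)) := by
    rw [hel1, hel2]
    refine Prod.ext_iff.2 ⟨by omega, rfl⟩
  rw [pvQ, hlk, harg, pvSetCont]
  by_cases h1 : (y, x-1) ∈ g <;> by_cases h2 : (y+1, x-1) ∈ g <;> simp [hmem, h1, h2]

theorem pvP_top (g : List (Int × Int)) (y x : Int) (hc : (y, x) ∈ g) :
    pvP g (2*y-1, 2*x)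
      = (!decide ((y-1, x) ∈ g) && (!decide ((y, x-1) ∈ g) || decide ((y-1, x-1) ∈ g))) := by
  by_cases hup : (y-1, x) ∈ g
  · have hbd : pvBd g (2*y-1, 2*x) = false := by
      rw [← Bool.not_eq_true]
      intro h
      exact ((pvTop_spec g y x hc).1).1 h hup
    simp [pvP, hbd, hup]
  · have hbd : pvBd g (2*y-1, 2*x) = true := ((pvTop_spec g y x hc).1).2 hup
    simp [pvP, hbd, hup, pvQ_top g y x hc hup, decide_not]

theorem pvP_left (g : List (Int × Int)) (y x : Int) (hc : (y, x) ∈ g) :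
    pvP g (2*y, 2*x-1)
      = (!decide ((y, x-1) ∈ g) && (!decide ((y-1, x) ∈ g) || decide ((y-1, x-1) ∈ g))) := by
  by_cases hl : (y, x-1) ∈ g
  · have hbd : pvBd g (2*y, 2*x-1) = false := by
      rw [← Bool.not_eq_true]
      intro h
      exact ((pvLeft_spec g y x hc).1).1 h hl
    simp [pvP, hbd, hl]
  · have hbd : pvBd g (2*y, 2*x-1) = true := ((pvLeft_spec g y x hc).1).2 hl
    simp [pvP, hbd, hl, pvQ_left g y x hc hl, decide_not]

theorem pvP_right (g : List (Int × Int)) (y x : Int) (hc : (y, x) ∈ g) :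
    pvP g (2*y, 2*x+1)
      = (!decide ((y, x+1) ∈ g) && (!decide ((y-1, x) ∈ g) || decide ((y-1, x+1) ∈ g))) := by
  by_cases hr : (y, x+1) ∈ g
  · have hbd : pvBd g (2*y, 2*x+1) = false := by
      rw [← Bool.not_eq_true]
      intro h
      exact ((pvRight_spec g y x hc).1).1 h hr
    simp [pvP, hbd, hr]
  · have hbd : pvBd g (2*y, 2*x+1) = true := ((pvRight_spec g y x hc).1).2 hr
    simp [pvP, hbd, hr, pvQ_right g y x hc hr, decide_not]

theorem pvP_bot (g : List (Int × Int)) (y x : Int) (hc : (y, x) ∈ g) :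
    pvP g (2*y+1, 2*x)
      = (!decide ((y+1, x) ∈ g) && (!decide ((y, x-1) ∈ g) || decide ((y+1, x-1) ∈ g))) := by
  by_cases hd : (y+1, x) ∈ g
  · have hbd : pvBd g (2*y+1, 2*x) = false := by
      rw [← Bool.not_eq_true]
      intro h
      exact ((pvBot_spec g y x hc).1).1 h hd
    simp [pvP, hbd, hd]
  · have hbd : pvBd g (2*y+1, 2*x) = true := ((pvBot_spec g y x hc).1).2 hd
    simp [pvP, hbd, hd, pvQ_bot g y x hc hd, decide_not]

def pvIndB (g : List (Int × Int)) (c : Int × Int) : Int :=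
  (if (!decide ((c.1-1, c.2) ∈ g) && (!decide ((c.1, c.2-1) ∈ g) || decide ((c.1-1, c.2-1) ∈ g))) = true then 1 else 0)
  + (if (!decide ((c.1+1, c.2) ∈ g) && (!decide ((c.1, c.2-1) ∈ g) || decide ((c.1+1, c.2-1) ∈ g))) = true then 1 else 0)
  + (if (!decide ((c.1, c.2-1) ∈ g) && (!decide ((c.1-1, c.2) ∈ g) || decide ((c.1-1, c.2-1) ∈ g))) = true then 1 else 0)
  + (if (!decide ((c.1, c.2+1) ∈ g) && (!decide ((c.1-1, c.2) ∈ g) || decide ((c.1-1, c.2+1) ∈ g))) = true then 1 else 0)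

theorem pvB_eq (g : List (Int × Int)) :
    perimeter2_py_alt g = ((PySem.Set.ofList g).map (pvIndB g)).sum := by
  unfold perimeter2_py_alt
  rw [PySem.List.foldl_congr_mem _ _ (fun acc c => acc + pvIndB g c) 0 ?_]
  · rw [PySem.List.foldl_add]
    simp
  · intro acc c _
    simp only [pvSetCont, PySem.Set.mem_ofList, pvIndB]
    split_ifs <;> ring

theorem pvCell (g : List (Int × Int)) (y x : Int) (hc : (y, x) ∈ g) :
    (((pvP4 (y, x)).countP (fun e => pvP g e.1)) : Int) = pvIndB g (y, x) := by
  have h1 := pvP_top g y x hc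
  have h2 := pvP_left g y x hc
  have h3 := pvP_right g y x hc
  have h4 := pvP_bot g y x hc
  simp only [pvP4, List.countP_cons, List.countP_nil]
  simp only [pvIndB]
  simp only at h1 h2 h3 h4 ⊢
  rw [h1, h2, h3, h4]
  push_cast
  split_ifs <;> omega

theorem pvAB (g : List (Int × Int)) : perimeter2_py g = perimeter2_py_alt g := by
  rw [pvA_cells, pvB_eq, List.countP_flatMap, Nat.cast_list_sum, List.map_map]
  rw [show PySem.List.dedup g = PySem.Set.ofList g from by simp]
  apply congrArg List.sum
  apply List.map_congr_left
  intro c hcm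
  have hc : c ∈ g := (PySem.Set.mem_ofList g c).1 hcm
  obtain ⟨y, x⟩ := c
  simpa using pvCell g y x hc

-- ===== VERDICT (by name: the statement is the Claim_ definition above) =====
theorem perimeter2_py_spec : Claim_equal_perimeter2_py := by
  intro group _
  unfold Spec_perimeter2_py
  exact pvAB group
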